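-- pv_equiv track=rewrite | github.com/jonhferreira/Projeto-Processamento-Imagens-2021.2 | sample/identify_object.py | clearComment
-- ===== SOURCE A (Python) =====
-- def clearComment(matriz_img):
--     cont = 0
--     comentarios = []
--     for linha in matriz_img:
--         if '#' in linha:
--             cont = 0
--             comentarios.append(linha)
--         elif cont >= 4:
--             break
--         else:
--             cont += 1
--
--     for comentario in comentarios:
--         matriz_img.remove(comentario)
--
--     return matriz_img
-- ===== SOURCE B (Python) =====
-- def clearComment(matriz_img):
--     cont = 0
--     stopped = False
--     result = []
--     for linha in matriz_img:
--         if stopped: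
--             result.append(linha)
--         elif '#' in linha:
--             cont = 0
--         elif cont >= 4:
--             stopped = True
--             result.append(linha)
--         else:
--             cont += 1
--             result.append(linha)
--     matriz_img[:] = result
--     return matriz_img
-- ===== Notes on version B (the rewrite author's own statement) =====
-- stated objective: simpler
-- what changed: Single forward pass that builds the result directly (skip comment lines until the 5th consecutive non-comment line, then copy the rest), replacing A's collect-then-remove-by-value second pass; written back in place via slice assignment.
import Mathlib
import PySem

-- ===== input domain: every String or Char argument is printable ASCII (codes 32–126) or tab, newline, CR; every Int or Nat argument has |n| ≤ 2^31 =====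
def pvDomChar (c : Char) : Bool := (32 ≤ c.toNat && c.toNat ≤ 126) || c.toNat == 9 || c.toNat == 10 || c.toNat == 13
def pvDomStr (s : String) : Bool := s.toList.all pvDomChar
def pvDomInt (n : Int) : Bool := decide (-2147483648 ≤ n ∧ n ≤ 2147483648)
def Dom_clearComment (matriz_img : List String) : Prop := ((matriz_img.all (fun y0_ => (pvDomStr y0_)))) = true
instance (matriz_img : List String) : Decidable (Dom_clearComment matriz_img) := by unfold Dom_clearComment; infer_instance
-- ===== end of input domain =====

-- B replaces A's collect-comments-then-remove-by-value second pass with one forward pass that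
-- builds the result directly; simpler, same return value. A mutates its argument in place
-- (B mimics this with a slice assignment); the equivalence proved here is about the return value.

-- ===== PORT A =====
-- first loop of A: scan matriz_img with counter `cont`, collecting the '#'-lines; `[]` on break
def clearCommentScan : List String → Int → List String
  | [], _ => []
  | linha :: rest, cont =>
    if PySem.Str.isIn "#" linha then linha :: clearCommentScan rest 0
    else if cont ≥ 4 then []          -- break
    else clearCommentScan rest (cont + 1)

-- second loop: matriz_img.remove(comentario) for each collected line (remove never fails here,
-- each collected line is present; `.getD acc` is the unreachable ValueError branch)
def clearComment (matriz_img : List String) : List String :=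
  (clearCommentScan matriz_img 0).foldl
    (fun acc c => (PySem.List.remove? acc c).getD acc) matriz_img

-- ===== PORT B =====
def clearCommentLoop : List String → Int → Bool → List String
  | [], _, _ => []
  | linha :: rest, cont, stopped =>
    if stopped then linha :: clearCommentLoop rest cont stopped
    else if PySem.Str.isIn "#" linha then clearCommentLoop rest 0 false
    else if cont ≥ 4 then linha :: clearCommentLoop rest cont true
    else linha :: clearCommentLoop rest (cont + 1) false

def clearComment_alt (matriz_img : List String) : List String :=
  clearCommentLoop matriz_img 0 false

-- ===== PRECONDITION & SPEC =====
def Spec_clearComment (matriz_img : List String) (out : List String) : Prop := out = clearComment_alt matriz_img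
instance (matriz_img : List String) (out : List String) : Decidable (Spec_clearComment matriz_img out) := by unfold Spec_clearComment; infer_instance

-- ===== CLAIM (what is proved, stated in full; the proofs are below) =====
def Claim_equal_clearComment : Prop := ∀ (matriz_img : List String), Dom_clearComment matriz_img → Spec_clearComment matriz_img (clearComment matriz_img)

-- ===== LEMMAS AND PROOFS =====

-- once stopped, B's loop copies the rest unchanged
theorem loop_stopped (xs : List String) (cont : Int) :
    clearCommentLoop xs cont true = xs := by
  induction xs with
  | nil => simp [clearCommentLoop]
  | cons x rest ih => simp [clearCommentLoop, ih]

-- every line A collects contains '#'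
theorem scan_mem_isIn (xs : List String) (cont : Int) (c : String)
    (hc : c ∈ clearCommentScan xs cont) : PySem.Str.isIn "#" c = true := by
  induction xs generalizing cont with
  | nil => simp [clearCommentScan] at hc
  | cons x rest ih =>
    unfold clearCommentScan at hc
    by_cases h1 : PySem.Str.isIn "#" x = true
    · rw [if_pos h1] at hc
      rcases List.mem_cons.mp hc with hc | hc
      · subst hc; assumption
      · exact ih _ hc
    · rw [if_neg h1] at hc
      by_cases h2 : cont ≥ 4
      · rw [if_pos h2] at hc; simp at hc
      · rw [if_neg h2] at hc; exact ih _ hc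

-- removing a list of '#'-lines from (l :: rest) with l not a '#'-line leaves l in front
theorem foldl_remove_cons (cs : List String) (l : String) (rest : List String)
    (hl : PySem.Str.isIn "#" l = false)
    (hcs : ∀ c ∈ cs, PySem.Str.isIn "#" c = true) :
    cs.foldl (fun acc c => (PySem.List.remove? acc c).getD acc) (l :: rest)
      = l :: cs.foldl (fun acc c => (PySem.List.remove? acc c).getD acc) rest := by
  induction cs generalizing rest with
  | nil => rfl
  | cons c cs' ih =>
    have hne : l ≠ c := by
      intro h; rw [h, hcs c (by simp)] at hl; cases hl
    have hcs' : ∀ c' ∈ cs', PySem.Str.isIn "#" c' = true := fun c' h => hcs c' (by simp [h])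
    simp only [List.foldl_cons, PySem.List.remove?_cons_of_ne rest hne]
    cases hr : PySem.List.remove? rest c with
    | none => simpa [hr] using ih rest hcs'
    | some r => simpa [hr] using ih r hcs'

-- the heart of the proof: A's scan-then-remove equals B's loop, for every counter value
theorem main_lemma (xs : List String) (cont : Int) :
    (clearCommentScan xs cont).foldl
      (fun acc c => (PySem.List.remove? acc c).getD acc) xs
      = clearCommentLoop xs cont false := by
  induction xs generalizing cont with
  | nil => rfl
  | cons l rest ih =>
    unfold clearCommentScan clearCommentLoop
    by_cases h1 : PySem.Str.isIn "#" l = true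
    · rw [if_pos h1, if_pos h1, List.foldl_cons, PySem.List.remove?_cons_self,
        Option.getD_some]
      exact ih 0
    · have h1' : PySem.Str.isIn "#" l = false := by
        cases h : PySem.Str.isIn "#" l
        · rfl
        · exact absurd h h1
      by_cases h2 : cont ≥ 4
      · rw [if_neg h1, if_neg h1, if_pos h2, if_pos h2, List.foldl_nil, loop_stopped, if_neg (Bool.false_ne_true)]
      · rw [if_neg h1, if_neg h1, if_neg h2, if_neg h2,
          foldl_remove_cons (clearCommentScan rest (cont + 1)) l rest h1'
            (fun c hc => scan_mem_isIn rest (cont + 1) c hc), ih (cont + 1), if_neg (Bool.false_ne_true)]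

-- ===== VERDICT (by name: the statement is the Claim_ definition above) =====
theorem clearComment_spec : Claim_equal_clearComment := by
  intro m _
  show clearComment m = clearComment_alt m
  exact main_lemma m 0
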